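-- pv_equiv track=rewrite | github.com/KATTA-00/Competitive-Programming | Competitions/IEEEXtrem/weekend_coding_challenge 2023/weekend_coding_challenge_02/Chandula/ThreeLoops.py | count_tuples
-- ===== SOURCE A (Python) =====
-- def count_tuples(n, target_sum):
--     count = 0
--
--     for a in range(1, n + 1):
--         for b in range(1, n + 1):
--             c = target_sum - a - b
--             if 1 <= c <= n:
--                 count += 1
--
--     return count
-- ===== SOURCE B (Python) =====
-- def count_tuples(n, target_sum):
--     total = 0
--     for a in range(1, n + 1):
--         lo = max(1, target_sum - a - n)
--         hi = min(n, target_sum - a - 1)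
--         if lo <= hi:
--             total += hi - lo + 1
--     return total
-- ===== Notes on version B (the rewrite author's own statement) =====
-- stated objective: faster
-- what changed: Replaced the inner loop over b with a closed-form count of the clamped interval of valid b values per a, making the algorithm a single O(n) pass instead of an O(n^2) double loop.
import Mathlib
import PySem

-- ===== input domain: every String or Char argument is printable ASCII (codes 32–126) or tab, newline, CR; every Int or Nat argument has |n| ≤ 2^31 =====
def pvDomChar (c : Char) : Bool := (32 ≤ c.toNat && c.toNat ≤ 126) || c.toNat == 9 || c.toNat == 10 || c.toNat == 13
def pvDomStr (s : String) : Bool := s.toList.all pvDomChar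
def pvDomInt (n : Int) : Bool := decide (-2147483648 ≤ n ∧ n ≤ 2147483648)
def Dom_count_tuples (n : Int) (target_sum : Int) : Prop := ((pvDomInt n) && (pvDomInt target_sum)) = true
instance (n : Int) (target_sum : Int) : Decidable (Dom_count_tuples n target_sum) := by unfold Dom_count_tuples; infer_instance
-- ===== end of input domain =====

-- B replaces A's inner loop over b with a closed-form clamped-interval count per a (O(n^2) -> O(n)).


-- ===== PORT A =====
def count_tuples (n : Int) (target_sum : Int) : Int :=
  (PySem.List.pyRange 1 (n + 1) 1).foldl (fun count a =>
    (PySem.List.pyRange 1 (n + 1) 1).foldl (fun count b =>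
      let c := target_sum - a - b
      if 1 ≤ c ∧ c ≤ n then count + 1 else count) count) 0

-- ===== PORT B =====
def count_tuples_alt (n : Int) (target_sum : Int) : Int :=
  (PySem.List.pyRange 1 (n + 1) 1).foldl (fun total a =>
    let lo := max 1 (target_sum - a - n)
    let hi := min n (target_sum - a - 1)
    if lo ≤ hi then total + (hi - lo + 1) else total) 0

-- ===== PRECONDITION & SPEC =====
def Spec_count_tuples (n : Int) (target_sum : Int) (out : Int) : Prop := out = count_tuples_alt n target_sum
instance (n : Int) (target_sum : Int) (out : Int) : Decidable (Spec_count_tuples n target_sum out) := by unfold Spec_count_tuples; infer_instance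

-- ===== CLAIM =====
def Claim_equal_count_tuples : Prop := ∀ (n : Int) (target_sum : Int), Dom_count_tuples n target_sum → Spec_count_tuples n target_sum (count_tuples n target_sum)

-- ===== LEMMAS AND PROOFS =====

-- The inner loop of A counts b ∈ [1, m] with 1 ≤ s - b ≤ n, which is the clamped interval count.
lemma inner_count (m : Nat) (s n : Int) : ∀ init : Int,
    (PySem.List.pyRange 1 ((m : Int) + 1) 1).foldl (fun count b =>
      if 1 ≤ s - b ∧ s - b ≤ n then count + 1 else count) init
    = init + (if max 1 (s - n) ≤ min (m : Int) (s - 1)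
              then min (m : Int) (s - 1) - max 1 (s - n) + 1 else 0) := by
  induction m with
  | zero =>
    intro init
    rw [PySem.List.pyRange_one_eq_nil (by norm_num)]
    simp only [List.foldl_nil]
    split_ifs with h
    · exfalso; omega
    · omega
  | succ k ih =>
    intro init
    have h1 : (1 : Int) ≤ (k : Int) + 1 := by omega
    rw [show (((k + 1 : Nat) : Int) + 1) = (((k : Int) + 1) + 1) by push_cast; ring,
        PySem.List.pyRange_one_succ_right h1, List.foldl_append, ih]
    simp only [List.foldl_cons, List.foldl_nil]
    push_cast
    split_ifs <;> omega

theorem count_tuples_spec : Claim_equal_count_tuples := by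
  intro n t _
  unfold Spec_count_tuples count_tuples count_tuples_alt
  by_cases hn : n < 1
  · rw [PySem.List.pyRange_one_eq_nil (by omega)]
    simp
  · rw [not_lt] at hn
    have hcast : ((n.toNat : Int)) = n := Int.toNat_of_nonneg (by omega)
    apply PySem.List.foldl_congr_mem
    intro acc a _ha
    simp only []
    rw [show n + 1 = (n.toNat : Int) + 1 by omega,
        inner_count n.toNat (t - a) n acc, hcast]
    split_ifs <;> omega
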